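-- pv_equiv track=rewrite | github.com/profoundsea25/Algorithm | WTC - TEST1/1.py | solution
-- ===== SOURCE A (Python) =====
-- def solution(arr):
--     ott = [0,0,0]
--     for i in arr :
--         if i == 1 :
--             ott[0] += 1
--         elif i == 2 :
--             ott[1] += 1
--         elif i == 3 :
--             ott[2] += 1
--     cri = max(ott)
--     answer = [0,0,0]
--     for i in range(3) :
--         answer[i] = cri - ott[i]
--     return answer
-- ===== SOURCE B (Python) =====
-- def solution(arr):
--     s = sorted(arr)
--     counts = [0, 0, 0]
--     i, n = 0, len(s)
--     while i < n:
--         v, j = s[i], i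
--         while j < n and s[j] == v:
--             j += 1
--         if 1 <= v <= 3:
--             counts[v - 1] += j - i
--         i = j
--     m = max(counts)
--     return [m - c for c in counts]
-- ===== Notes on version B (the rewrite author's own statement) =====
-- stated objective: alternative
-- what changed: Sorts the array and counts run lengths of adjacent equal values (sort-then-group-scan) instead of A's single classifying pass with branch dispatch into three buckets.
import Mathlib
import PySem

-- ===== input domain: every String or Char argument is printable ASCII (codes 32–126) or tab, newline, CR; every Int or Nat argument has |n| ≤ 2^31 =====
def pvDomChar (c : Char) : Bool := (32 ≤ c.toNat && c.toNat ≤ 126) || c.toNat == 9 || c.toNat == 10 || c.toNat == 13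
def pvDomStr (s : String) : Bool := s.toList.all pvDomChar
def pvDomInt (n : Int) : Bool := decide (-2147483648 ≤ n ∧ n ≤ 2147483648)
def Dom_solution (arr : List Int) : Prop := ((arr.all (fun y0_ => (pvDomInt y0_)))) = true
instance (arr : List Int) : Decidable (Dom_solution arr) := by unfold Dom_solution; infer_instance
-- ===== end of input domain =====

-- B sorts the array and counts run lengths of adjacent equal values instead of A's
-- single classifying pass; objective: alternative (same results, different algorithm).

-- ===== PORT A =====
-- one pass, classifying each element into one of three buckets (ott); the loop body:
def solutionStep (ott : Int × Int × Int) (i : Int) : Int × Int × Int :=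
  if i == 1 then (ott.1 + 1, ott.2.1, ott.2.2)
  else if i == 2 then (ott.1, ott.2.1 + 1, ott.2.2)
  else if i == 3 then (ott.1, ott.2.1, ott.2.2 + 1)
  else ott

def solution (arr : List Int) : List Int :=
  let ott := arr.foldl solutionStep (0, 0, 0)
  let cri := max ott.1 (max ott.2.1 ott.2.2)
  [cri - ott.1, cri - ott.2.1, cri - ott.2.2]

-- ===== PORT B =====
-- the outer while loop of Source B: peel one maximal run of equal values off the front,
-- add its length to the matching bucket (if the value is 1..3), continue on the rest
def runScan : List Int → Int × Int × Int → Int × Int × Int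
  | [], acc => acc
  | x :: xs, acc =>
    let run := xs.takeWhile (fun y => y == x)
    let rest := xs.dropWhile (fun y => y == x)
    let len : Int := 1 + run.length
    let acc' :=
      if 1 ≤ x ∧ x ≤ 3 then
        (if x == 1 then (acc.1 + len, acc.2.1, acc.2.2)
         else if x == 2 then (acc.1, acc.2.1 + len, acc.2.2)
         else (acc.1, acc.2.1, acc.2.2 + len))
      else acc
    runScan rest acc'
  termination_by s _ => s.length
  decreasing_by
    simpa using Nat.lt_succ_of_le (List.length_dropWhile_le (fun y => y == x) xs)

def solution_alt (arr : List Int) : List Int :=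
  let s := PySem.List.sorted arr (fun x => x) false
  let counts := runScan s (0, 0, 0)
  let m := max counts.1 (max counts.2.1 counts.2.2)
  [m - counts.1, m - counts.2.1, m - counts.2.2]

-- ===== PRECONDITION & SPEC =====
def Spec_solution (arr : List Int) (out : List Int) : Prop := out = solution_alt arr
instance (arr : List Int) (out : List Int) : Decidable (Spec_solution arr out) := by unfold Spec_solution; infer_instance

-- ===== CLAIM (what is proved, stated in full; the proofs are below) =====
def Claim_equal_solution : Prop := ∀ (arr : List Int), Dom_solution arr → Spec_solution arr (solution arr)

-- ===== LEMMAS AND PROOFS =====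
theorem solution_fold_counts (arr : List Int) (a b c : Int) :
    arr.foldl solutionStep (a, b, c)
    = (a + arr.count 1, b + arr.count 2, c + arr.count 3) := by
  induction arr generalizing a b c with
  | nil => simp
  | cons x xs ih =>
    rw [List.foldl_cons]
    by_cases h1 : x = 1
    · rw [show solutionStep (a, b, c) x = (a + 1, b, c) by simp [solutionStep, h1], ih]
      simp [h1, Prod.ext_iff]; omega
    · by_cases h2 : x = 2
      · rw [show solutionStep (a, b, c) x = (a, b + 1, c) by simp [solutionStep, h2], ih]
        simp [h2, Prod.ext_iff]; omega
      · by_cases h3 : x = 3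
        · rw [show solutionStep (a, b, c) x = (a, b, c + 1) by simp [solutionStep, h1, h2, h3], ih]
          simp [h3, Prod.ext_iff]; omega
        · rw [show solutionStep (a, b, c) x = (a, b, c) by simp [solutionStep, h1, h2, h3], ih]
          simp [h1, h2, h3]

-- the run scan accumulates exactly the multiset counts of 1, 2 and 3
theorem runScan_counts : ∀ (n : Nat) (s : List Int), s.length ≤ n → ∀ a b c : Int,
    runScan s (a, b, c)
    = (a + s.count 1, b + s.count 2, c + s.count 3) := by
  intro n
  induction n with
  | zero =>
    intro s hs a b c
    have : s = [] := List.eq_nil_of_length_eq_zero (Nat.le_zero.mp hs)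
    subst this; simp [runScan]
  | succ n ih =>
    intro s hs a b c
    cases s with
    | nil => simp [runScan]
    | cons x xs =>
      rw [runScan]
      have hsplit : xs.takeWhile (fun y => y == x) ++ xs.dropWhile (fun y => y == x) = xs :=
        List.takeWhile_append_dropWhile
      have hrep : xs.takeWhile (fun y => y == x)
          = List.replicate (xs.takeWhile (fun y => y == x)).length x := by
        apply List.eq_replicate_of_mem
        intro y hy
        have := List.mem_takeWhile_imp hy
        simpa using this
      have hrest : (xs.dropWhile (fun y => y == x)).length ≤ n :=
        le_trans (List.length_dropWhile_le _ _) (Nat.succ_le_succ_iff.mp hs)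
      rw [ih _ hrest]
      have hcount : ∀ v : Int, (x :: xs).count v
          = (if v = x then (xs.takeWhile (fun y => y == x)).length + 1 else 0)
            + (xs.dropWhile (fun y => y == x)).count v := by
        intro v
        have hstep : (x :: xs).count v
            = (x :: xs.takeWhile (fun y => y == x)).count v
              + (xs.dropWhile (fun y => y == x)).count v := by
          conv_lhs => rw [← hsplit]
          simp only [List.count_cons, List.count_append]
          omega
        rw [hstep]
        congr 1
        conv_lhs => rw [hrep, ← List.replicate_succ]
        rw [List.count_replicate]
        rcases eq_or_ne v x with hv | hv
        · subst hv; simp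
        · simp [hv, hv.symm]
      have e1 := hcount 1
      have e2 := hcount 2
      have e3 := hcount 3
      by_cases h1 : x = 1
      · subst h1
        norm_num at e1 e2 e3 ⊢
        refine ⟨by omega, by omega, by omega⟩
      · by_cases h2 : x = 2
        · subst h2
          norm_num at e1 e2 e3 ⊢
          refine ⟨by omega, by omega, by omega⟩
        · by_cases h3 : x = 3
          · subst h3
            norm_num at e1 e2 e3 ⊢
            refine ⟨by omega, by omega, by omega⟩
          · have hr : ¬ ((1:Int) ≤ x ∧ x ≤ 3) := by omega
            rw [if_neg hr]
            rw [if_neg (show ¬(1:Int) = x from fun h => h1 h.symm)] at e1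
            rw [if_neg (show ¬(2:Int) = x from fun h => h2 h.symm)] at e2
            rw [if_neg (show ¬(3:Int) = x from fun h => h3 h.symm)] at e3
            simp only [Prod.mk.injEq]
            refine ⟨by omega, by omega, by omega⟩

theorem runScan_eq (s : List Int) (a b c : Int) :
    runScan s (a, b, c) = (a + s.count 1, b + s.count 2, c + s.count 3) :=
  runScan_counts s.length s le_rfl a b c

-- ===== VERDICT (by name: the statement is the Claim_ definition above) =====
theorem solution_spec : Claim_equal_solution := by
  intro arr _
  show solution arr = solution_alt arr
  have hperm := PySem.List.sorted_perm arr (fun x => x) false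
  unfold solution solution_alt
  simp only [solution_fold_counts, runScan_eq, hperm.count_eq]
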